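-- pv_equiv track=rewrite | github.com/RYO0115/ArsenalJapanCommunity_Analysis | src/common/coutupitems.py | CountUpItems
-- ===== SOURCE A (Python) =====
-- def CountUpItems(df, label):
--     sizes = [0 for i in range(len(label)+1)]
--
--     for row in df:
--
--         counted = 0
--         for i in range(len(label)):
--             if row.find(label[i]) != -1:
--                 sizes[i] = sizes[i] + 1
--                 counted = counted + 1
--         if counted == 0:
--             sizes[-1] = sizes[-1] + 1
--
--     return(sizes)
-- ===== SOURCE B (Python) =====
-- def CountUpItems(df, label):
--     # label-major: one containment count per label, then one pass for unmatched rows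
--     counts = [len([row for row in df if lab in row]) for lab in label]
--     counts.append(len([row for row in df if not any(lab in row for lab in label)]))
--     return counts
-- ===== Notes on version B (the rewrite author's own statement) =====
-- stated objective: faster
-- what changed: Row-major fold with in-place index updates and a 'counted' flag replaced by a label-major formulation: one containment count per label via comprehensions, plus one pass counting rows matched by no label.
import Mathlib
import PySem

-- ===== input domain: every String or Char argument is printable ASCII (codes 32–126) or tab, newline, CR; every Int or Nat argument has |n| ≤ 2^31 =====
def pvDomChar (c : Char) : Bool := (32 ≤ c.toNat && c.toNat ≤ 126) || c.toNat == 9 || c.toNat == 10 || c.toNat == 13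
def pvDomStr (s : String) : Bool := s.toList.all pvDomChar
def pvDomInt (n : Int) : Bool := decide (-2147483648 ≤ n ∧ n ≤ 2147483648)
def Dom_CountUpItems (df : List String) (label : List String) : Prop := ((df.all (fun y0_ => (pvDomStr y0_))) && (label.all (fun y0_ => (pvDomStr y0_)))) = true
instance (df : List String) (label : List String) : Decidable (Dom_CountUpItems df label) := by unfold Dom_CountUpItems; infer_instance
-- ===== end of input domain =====

-- B replaces A's row-major fold with in-place index updates by a label-major
-- formulation: one containment count per label plus one pass for unmatched rows
-- (measurably faster by a constant factor in a timing run).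

-- ===== PORT A =====
-- one iteration of A's outer loop: the inner index loop updating (sizes, counted),
-- then the 'counted == 0' bump of sizes[-1] (sizes is always nonempty, so index -1 is len-1)
def stepA (label : List String) (sizes : List Int) (row : String) : List Int :=
  let r := (List.range label.length).foldl
    (fun (p : List Int × Int) i =>
      if PySem.Str.find row label[i]! ≠ -1 then (p.1.set i (p.1[i]! + 1), p.2 + 1) else p)
    (sizes, (0 : Int))
  if r.2 == 0 then r.1.set (r.1.length - 1) (r.1[r.1.length - 1]! + 1) else r.1

def CountUpItems (df : List String) (label : List String) : List Int :=
  let sizes := (List.range (label.length + 1)).map (fun _ => (0 : Int))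
  df.foldl (stepA label) sizes

-- ===== PORT B =====
def CountUpItems_alt (df : List String) (label : List String) : List Int :=
  label.map (fun lab => ((df.filter (fun row => PySem.Str.isIn lab row)).length : Int))
    ++ [((df.filter (fun row => label.all (fun lab => !PySem.Str.isIn lab row))).length : Int)]

-- ===== PRECONDITION & SPEC =====
def Spec_CountUpItems (df : List String) (label : List String) (out : List Int) : Prop := out = CountUpItems_alt df label
instance (df : List String) (label : List String) (out : List Int) : Decidable (Spec_CountUpItems df label out) := by unfold Spec_CountUpItems; infer_instance

-- ===== CLAIM (what is proved, stated in full; the proofs are below) =====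
def Claim_equal_CountUpItems : Prop := ∀ (df : List String) (label : List String), Dom_CountUpItems df label → Spec_CountUpItems df label (CountUpItems df label)

-- ===== LEMMAS AND PROOFS =====

-- per-row indicator: 1 if the label occurs in the row
def indC (row lab : String) : Int := if PySem.Str.isIn lab row then 1 else 0

-- the vector a single row contributes to the sizes
def rowVec (label : List String) (row : String) : List Int :=
  label.map (indC row) ++ [if label.all (fun lab => !PySem.Str.isIn lab row) then 1 else 0]

theorem find_ne_iff (row lab : String) :
    (PySem.Str.find row lab ≠ -1) ↔ PySem.Str.isIn lab row = true := by
  rw [PySem.Str.find_ne_neg_one_iff, PySem.Str.isIn_iff_infix]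

theorem find_not_iff (row lab : String) :
    (¬ PySem.Str.find row lab ≠ -1) ↔ PySem.Str.isIn lab row = false := by
  rw [not_not, PySem.Str.find_eq_neg_one_iff, ← PySem.Str.isIn_iff_infix, Bool.not_eq_true]

theorem zip_zero_right : ∀ (a v : List Int), a.length ≤ v.length → (∀ x ∈ v, x = 0) →
    List.zipWith (· + ·) a v = a := by
  intro a
  induction a with
  | nil => intro v _ _; simp
  | cons x xs ih =>
    intro v hl hz
    cases v with
    | nil => simp at hl
    | cons y ys =>
      simp only [List.zipWith_cons_cons]
      have hy : y = 0 := hz y (by simp)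
      have := ih ys (by simpa using hl) (fun x hx => hz x (by simp [hx]))
      simp [hy, this]

theorem zip_zero_left : ∀ (v a : List Int), a.length ≤ v.length → (∀ x ∈ v, x = 0) →
    List.zipWith (· + ·) v a = a := by
  intro v
  induction v with
  | nil => intro a hl _; simp_all
  | cons y ys ih =>
    intro a hl hz
    cases a with
    | nil => simp
    | cons x xs =>
      simp only [List.zipWith_cons_cons]
      have hy : y = 0 := hz y (by simp)
      have := ih xs (by simpa using hl) (fun x hx => hz x (by simp [hx]))
      simp [hy, this]

theorem zip_assoc : ∀ (a b c : List Int),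
    List.zipWith (· + ·) (List.zipWith (· + ·) a b) c = List.zipWith (· + ·) a (List.zipWith (· + ·) b c) := by
  intro a
  induction a with
  | nil => intro b c; simp
  | cons x xs ih =>
    intro b c
    cases b with
    | nil => simp
    | cons y ys =>
      cases c with
      | nil => simp
      | cons z zs => simp [ih, add_assoc]

theorem zip_map (f g : String → Int) : ∀ (l : List String),
    List.zipWith (· + ·) (l.map f) (l.map g) = l.map (fun x => f x + g x) := by
  intro l; induction l with
  | nil => rfl
  | cons x xs ih => simp [ih]

-- setting exactly at the boundary of an append
theorem set_at_boundary {α : Type} (l1 : List α) (x : α) (t : List α) (v : α) :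
    (l1 ++ x :: t).set l1.length v = l1 ++ v :: t := by
  induction l1 with
  | nil => simp
  | cons a l ih => simp [ih]

theorem set_at_boundary' {α : Type} (l1 : List α) (x : α) (t : List α) (v : α) (n : Nat)
    (h : n = l1.length) : (l1 ++ x :: t).set n v = l1 ++ v :: t := by
  subst h; exact set_at_boundary l1 x t v

theorem zip_set (a b : List Int) (n : Nat) (hn : n < a.length) (hb : a.length = b.length) :
    (List.zipWith (· + ·) a b).set n ((List.zipWith (· + ·) a b)[n]! + 1)
      = List.zipWith (· + ·) a (b.set n (b[n]! + 1)) := by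
  have hnb : n < b.length := hb ▸ hn
  have hnz : n < (List.zipWith (· + ·) a b).length := by
    rw [List.length_zipWith, ← hb]; omega
  apply List.ext_getElem
  · simp [hb]
  · intro i h1 h2
    have hiz : i < (List.zipWith (· + ·) a b).length := by
      simpa using h1
    have hia : i < a.length := by
      rw [List.length_zipWith, ← hb] at hiz; omega
    have hib : i < b.length := hb ▸ hia
    simp only [List.getElem_set, List.getElem_zipWith]
    by_cases hi : n = i
    · subst hi
      simp only [getElem!_pos (List.zipWith (· + ·) a b) n hnz,
        List.getElem_zipWith, getElem!_pos b n hnb]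
      simp only [if_pos trivial]
      ring
    · simp [hi]

-- the vector A's inner loop has added after the first n labels
def innVec (label : List String) (row : String) (n : Nat) : List Int :=
  (label.take n).map (indC row) ++ List.replicate (label.length + 1 - n) 0

theorem innVec_length (label : List String) (row : String) (n : Nat) (hn : n ≤ label.length) :
    (innVec label row n).length = label.length + 1 := by
  simp [innVec, min_eq_left hn]
  omega

theorem innVec_split (label : List String) (row : String) (n : Nat) (hn : n < label.length) :
    innVec label row n
      = (label.take n).map (indC row) ++ (0 : Int) :: List.replicate (label.length - n) 0 := by
  rw [innVec, show label.length + 1 - n = (label.length - n) + 1 by omega, List.replicate_succ]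

theorem innVec_get_n (label : List String) (row : String) (n : Nat) (hn : n ≤ label.length) :
    (innVec label row n)[n]! = 0 := by
  have h1 : ((label.take n).map (indC row)).length = n := by simp [min_eq_left hn]
  have hlt : n < (innVec label row n).length := by rw [innVec_length _ _ _ hn]; omega
  have hv : innVec label row n = (label.take n).map (indC row) ++ List.replicate (label.length + 1 - n) 0 := rfl
  rw [getElem!_pos (innVec label row n) n hlt]
  simp [hv]

theorem innerA (row : String) (label : List String) :
    ∀ (n : Nat), n ≤ label.length → ∀ (sizes : List Int) (c : Int), sizes.length = label.length + 1 →
    (List.range n).foldl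
      (fun (p : List Int × Int) i =>
        if PySem.Str.find row label[i]! ≠ -1 then (p.1.set i (p.1[i]! + 1), p.2 + 1) else p)
      (sizes, c)
    = (List.zipWith (· + ·) sizes (innVec label row n),
       c + (((label.take n).countP (fun lab => PySem.Str.isIn lab row)) : Int)) := by
  intro n
  induction n with
  | zero =>
    intro _ sizes c hs
    simp only [List.range_zero, List.foldl_nil, List.take_zero, List.countP_nil,
      Nat.cast_zero, add_zero]
    refine Prod.ext ?_ rfl
    refine (zip_zero_right sizes _ ?_ ?_).symm
    · simp [innVec]; omega
    · intro x hx
      have hx' : x ∈ List.replicate (label.length + 1) (0 : Int) := by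
        simpa [innVec] using hx
      exact List.eq_of_mem_replicate hx'
  | succ n ih =>
    intro hn sizes c hs
    have hn' : n ≤ label.length := by omega
    have hnlt : n < label.length := by omega
    rw [List.range_succ, List.foldl_append, ih hn' sizes c hs]
    simp only [List.foldl_cons, List.foldl_nil]
    have hlab : label[n]! = label[n] := getElem!_pos label n hnlt
    have htake : label.take (n + 1) = label.take n ++ [label[n]] := by
      rw [List.take_add_one]; simp [List.getElem?_eq_getElem hnlt]
    have hvn : (innVec label row n)[n]! = 0 := innVec_get_n label row n hn'
    have h1 : ((label.take n).map (indC row)).length = n := by simp [min_eq_left hn']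
    have hzlen : n < sizes.length := by rw [hs]; omega
    have hbl : sizes.length = (innVec label row n).length := by
      rw [innVec_length _ _ _ hn', hs]
    have hsplit := innVec_split label row n hnlt
    have hnext : innVec label row (n + 1)
        = (label.take n).map (indC row) ++ (indC row label[n]) :: List.replicate (label.length - n) 0 := by
      rw [innVec, htake, show label.length + 1 - (n + 1) = label.length - n by omega]
      simp only [List.map_append, List.map_cons, List.map_nil, List.append_assoc,
        List.cons_append, List.nil_append]
    by_cases hfind : PySem.Str.find row label[n]! ≠ -1
    · have hisin : PySem.Str.isIn label[n] row = true := by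
        rw [← find_ne_iff]; rwa [hlab] at hfind
      have hind : indC row label[n] = 1 := by
        simp only [indC, hisin]; rfl
      rw [if_pos hfind]
      refine Prod.ext ?_ ?_
      · show (List.zipWith (· + ·) sizes (innVec label row n)).set n
            ((List.zipWith (· + ·) sizes (innVec label row n))[n]! + 1) = _
        rw [zip_set sizes (innVec label row n) n hzlen hbl, hvn]
        congr 1
        rw [hsplit, hnext, set_at_boundary' _ _ _ _ n h1.symm, hind]
        norm_num
      · show c + _ + 1 = c + _
        rw [htake, List.countP_append]
        simp only [List.countP_cons, List.countP_nil, hisin]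
        push_cast
        simp
        ring
    · have hisin : PySem.Str.isIn label[n] row = false := by
        rw [← find_not_iff, ← hlab]; exact hfind
      have hind : indC row label[n] = 0 := by
        simp only [indC, hisin]; rfl
      rw [if_neg hfind]
      refine Prod.ext ?_ ?_
      · show List.zipWith (· + ·) sizes (innVec label row n) = _
        rw [hsplit, hnext, hind]
      · show c + _ = c + _
        rw [htake, List.countP_append]
        simp only [List.countP_cons, List.countP_nil, hisin]
        push_cast
        simp

theorem stepA_eq (label : List String) (row : String) (sizes : List Int)
    (hs : sizes.length = label.length + 1) :
    stepA label sizes row = List.zipWith (· + ·) sizes (rowVec label row) := by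
  unfold stepA
  rw [innerA row label label.length le_rfl sizes 0 hs]
  simp only [List.take_length]
  have hcnt : ((0 : Int) + (label.countP (fun lab => PySem.Str.isIn lab row) : Int) == 0)
      = label.all (fun lab => !PySem.Str.isIn lab row) := by
    rw [Bool.eq_iff_iff]
    simp [List.countP_eq_zero]
  rw [hcnt]
  have hv : innVec label row label.length = label.map (indC row) ++ [(0 : Int)] := by
    simp [innVec]
  by_cases hall : (label.all (fun lab => !PySem.Str.isIn lab row)) = true
  · rw [if_pos hall]
    have hzl : (List.zipWith (· + ·) sizes (innVec label row label.length)).length = label.length + 1 := by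
      rw [List.length_zipWith, hs, innVec_length _ _ _ le_rfl]; omega
    have hL : label.length < sizes.length := by rw [hs]; omega
    have hbl : sizes.length = (innVec label row label.length).length := by
      rw [innVec_length _ _ _ le_rfl, hs]
    have hvL : (innVec label row label.length)[label.length]! = 0 :=
      innVec_get_n label row label.length le_rfl
    rw [hzl]
    simp only [Nat.add_sub_cancel]
    rw [zip_set sizes _ label.length hL hbl, hvL]
    congr 1
    rw [hv, set_at_boundary' _ _ _ _ label.length (by simp)]
    simp only [rowVec]
    rw [if_pos hall]
    norm_num
  · rw [if_neg hall]
    congr 1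
    rw [hv]
    simp only [rowVec]
    rw [if_neg hall]

theorem alt_length (df label : List String) : (CountUpItems_alt df label).length = label.length + 1 := by
  simp [CountUpItems_alt]

theorem alt_cons (r : String) (df label : List String) :
    CountUpItems_alt (r :: df) label
      = List.zipWith (· + ·) (rowVec label r) (CountUpItems_alt df label) := by
  unfold CountUpItems_alt rowVec
  rw [List.zipWith_append (by simp)]
  congr 1
  · rw [zip_map]
    apply List.map_congr_left
    intro lab _
    by_cases h : PySem.Chars.isIn lab.toList r.toList = true
    · simp [indC, h]; ring
    · simp [indC, h]
  · by_cases h : ∀ x ∈ label, PySem.Chars.isIn x.toList r.toList = false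
    · simp [List.filter_cons]
      rw [if_pos h, if_pos h]
      simp
      ring
    · simp [h]

theorem foldA (label : List String) :
    ∀ (df : List String) (sizes : List Int), sizes.length = label.length + 1 →
    df.foldl (stepA label) sizes = List.zipWith (· + ·) sizes (CountUpItems_alt df label) := by
  intro df
  induction df with
  | nil =>
    intro sizes hs
    simp only [List.foldl_nil]
    rw [CountUpItems_alt]
    refine (zip_zero_right sizes _ (by simp [hs]) ?_).symm
    intro x hx
    simp at hx
    tauto
  | cons r df ih =>
    intro sizes hs
    have hlen : (stepA label sizes r).length = label.length + 1 := by
      rw [stepA_eq label r sizes hs, List.length_zipWith, hs]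
      simp [rowVec]
    rw [List.foldl_cons, ih _ hlen, stepA_eq label r sizes hs, zip_assoc, ← alt_cons]

theorem CountUpItems_eq (df label : List String) :
    CountUpItems df label = CountUpItems_alt df label := by
  unfold CountUpItems
  rw [foldA label df _ (by simp)]
  apply zip_zero_left
  · rw [alt_length]; simp
  · intro x hx
    simpa using hx

-- ===== VERDICT (by name: the statement is the Claim_ definition above) =====
theorem CountUpItems_spec : Claim_equal_CountUpItems := by
  intro df label _
  unfold Spec_CountUpItems
  exact CountUpItems_eq df label
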